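-- pv_equiv track=rewrite | github.com/gangsterofboats/advent-of-code-2018 | day-8/day-8.py | part_two
-- ===== SOURCE A (Python) =====
-- def part_two(input):
--     childs, metas = input[:2]
--     input = input[2:]
--     entries = []
--
--     for c in range(childs):
--         entry, input = part_two(input)
--         entries.append(entry)
--     if childs == 0:
--         return (sum(input[:metas]), input[metas:])
--     else:
--         return (
--             sum(entries[k - 1] for k in input[:metas] if k > 0 and k <= len(entries)),
--             input[metas:]
--         )
-- ===== SOURCE B (Python) =====
-- def _parse(input):
--     c, m = input[0], input[1]
--     rest = input[2:]
--     children = []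
--     for _ in range(c):
--         child, rest = _parse(rest)
--         children.append(child)
--     return (c, rest[:m], children), rest[m:]
--
-- def _value(node):
--     c, metas, children = node
--     if c == 0:
--         return sum(metas)
--     vals = [_value(ch) for ch in children]
--     return sum(vals[k - 1] for k in metas if 0 < k <= len(vals))
--
-- def part_two(input):
--     tree, rest = _parse(input)
--     return (_value(tree), rest)
-- ===== Notes on version B (the rewrite author's own statement) =====
-- stated objective: alternative
-- what changed: B splits A's single fused recursion into two passes: a parser that builds an explicit tree (child-count, metadata slice, children) plus the leftover list, and a separate recursive evaluator over that tree.
import Mathlib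
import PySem

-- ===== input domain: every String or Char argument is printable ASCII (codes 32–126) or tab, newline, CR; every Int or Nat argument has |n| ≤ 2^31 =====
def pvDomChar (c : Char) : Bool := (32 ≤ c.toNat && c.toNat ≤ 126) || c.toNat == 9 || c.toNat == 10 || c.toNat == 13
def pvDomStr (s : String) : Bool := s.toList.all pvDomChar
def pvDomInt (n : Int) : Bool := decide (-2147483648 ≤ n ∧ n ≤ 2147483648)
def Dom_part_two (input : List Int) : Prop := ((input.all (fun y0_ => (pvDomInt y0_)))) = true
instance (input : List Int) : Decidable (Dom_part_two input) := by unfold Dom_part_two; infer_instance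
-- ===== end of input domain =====

-- B re-implements part_two as two separate passes — an explicit parse into a tree value, then a
-- recursive evaluation of that tree — instead of A's single fused recursion; return values agree on
-- every input where A returns (A raises ValueError/RecursionError outside Pre_).

-- ===== PORT A =====
-- Fused recursive descent, one recursion computing values while consuming the list (fuel is only a
-- totality guard: input.length + 1 never runs out on any input A parses; the same guard is used in B).
mutual
def pvGoA (fuel : Nat) (input : List Int) : Int × List Int :=
  match fuel with
  | 0 => (0, [])
  | fuel + 1 =>
    match input with
    | c :: m :: rest =>
      let p := pvLoopA fuel c.toNat rest
      let entries := p.1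
      let inp := p.2
      if c = 0 then
        ((PySem.List.slice inp none (some m)).sum, PySem.List.slice inp (some m) none)
      else
        ((PySem.List.slice inp none (some m)).foldl
            (fun acc k => if 0 < k ∧ k ≤ (entries.length : Int) then acc + entries.getD (k - 1).toNat 0 else acc) 0,
         PySem.List.slice inp (some m) none)
    | _ => (0, [])  -- Python A raises ValueError here (len < 2); excluded by Pre_part_two
  termination_by (fuel, 0)
def pvLoopA (fuel : Nat) (k : Nat) (input : List Int) : List Int × List Int :=
  match k with
  | 0 => ([], input)
  | k + 1 =>
    let e := pvGoA fuel input
    let q := pvLoopA fuel k e.2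
    (e.1 :: q.1, q.2)
  termination_by (fuel, k + 1)
end

def part_two (input : List Int) : Int × List Int := pvGoA (input.length + 1) input

-- ===== PORT B =====
mutual
inductive PTree where
  | mk : Int → List Int → PForest → PTree
inductive PForest where
  | nil : PForest
  | cons : PTree → PForest → PForest
end

-- pass 1: _parse — build the explicit tree and the leftover list (no values computed)
mutual
def pvParseT (fuel : Nat) (input : List Int) : PTree × List Int :=
  match fuel with
  | 0 => (.mk 0 [] .nil, [])
  | fuel + 1 =>
    match input with
    | c :: m :: rest =>
      let q := pvParseF fuel c.toNat rest
      (.mk c (PySem.List.slice q.2 none (some m)) q.1, PySem.List.slice q.2 (some m) none)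
    | _ => (.mk 0 [] .nil, [])  -- Python B raises IndexError here; excluded by Pre_part_two
  termination_by (fuel, 0)
def pvParseF (fuel : Nat) (k : Nat) (input : List Int) : PForest × List Int :=
  match k with
  | 0 => (.nil, input)
  | k + 1 =>
    let e := pvParseT fuel input
    let q := pvParseF fuel k e.2
    (.cons e.1 q.1, q.2)
  termination_by (fuel, k + 1)
end

-- pass 2: _value — evaluate the tree
mutual
def pvValueT : PTree → Int
  | .mk c metas ch =>
    if c = 0 then metas.sum
    else
      let vals := pvValsF ch
      metas.foldl (fun acc k => if 0 < k ∧ k ≤ (vals.length : Int) then acc + vals.getD (k - 1).toNat 0 else acc) 0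
def pvValsF : PForest → List Int
  | .nil => []
  | .cons t f => pvValueT t :: pvValsF f
end

def part_two_alt (input : List Int) : Int × List Int :=
  let p := pvParseT (input.length + 1) input
  (pvValueT p.1, p.2)

-- ===== PRECONDITION & SPEC =====
-- Grammar check used by Pre_: does the list start with k well-formed node encodings
-- (header of 2 ints, then the children, then the metadata slice)?
def pvConsume (fuel : Nat) (k : Nat) (input : List Int) : Option (List Int) :=
  match k with
  | 0 => some input
  | k + 1 =>
    match fuel with
    | 0 => none
    | fuel + 1 =>
      match input with
      | c :: m :: rest =>
        match pvConsume fuel c.toNat rest with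
        | some r => pvConsume fuel k (PySem.List.slice r (some m) none)
        | none => none
      | _ => none

-- Pre_ excludes exactly the inputs on which Python A raises (ValueError from unpacking a list
-- shorter than 2 at some node of the recursion); A returns normally on every input admitted.
def Pre_part_two (input : List Int) : Prop := (pvConsume (input.length + 1) 1 input).isSome = true
instance (input : List Int) : Decidable (Pre_part_two input) := by unfold Pre_part_two; infer_instance

def pvWitness_part_two : List Int := [2, 3, 0, 3, 10, 11, 12, 1, 1, 0, 1, 99, 2, 1, 1, 2]

def Spec_part_two (input : List Int) (out : Int × List Int) : Prop := out = part_two_alt input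
instance (input : List Int) (out : Int × List Int) : Decidable (Spec_part_two input out) := by unfold Spec_part_two; infer_instance

-- ===== CLAIM (what is proved, stated in full; the proofs are below) =====
def Claim_equal_part_two : Prop := ∀ (input : List Int), Dom_part_two input → Pre_part_two input → Spec_part_two input (part_two input)

-- ===== LEMMAS AND PROOFS =====

theorem pvLoopA_eq (fuel : Nat)
    (hgo : ∀ input, pvGoA fuel input = (pvValueT (pvParseT fuel input).1, (pvParseT fuel input).2)) :
    ∀ (k : Nat) (input : List Int),
      pvLoopA fuel k input = (pvValsF (pvParseF fuel k input).1, (pvParseF fuel k input).2) := by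
  intro k
  induction k with
  | zero => intro input; simp [pvLoopA, pvParseF, pvValsF]
  | succ k ih => intro input; simp [pvLoopA, pvParseF, pvValsF, hgo, ih]

theorem pvGoA_eq : ∀ (fuel : Nat) (input : List Int),
    pvGoA fuel input = (pvValueT (pvParseT fuel input).1, (pvParseT fuel input).2) := by
  intro fuel
  induction fuel with
  | zero => intro input; simp [pvGoA, pvParseT, pvValueT]
  | succ fuel ih =>
    intro input
    match input with
    | [] => simp [pvGoA, pvParseT, pvValueT]
    | [c] => simp [pvGoA, pvParseT, pvValueT]
    | c :: m :: rest =>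
      simp only [pvGoA, pvParseT, pvLoopA_eq fuel ih, pvValueT]
      by_cases hc : c = 0 <;> simp [hc]

-- ===== VERDICT (by name: the statement is the Claim_ definition above) =====
theorem part_two_spec : Claim_equal_part_two := by
  intro input _ _
  unfold Spec_part_two part_two part_two_alt
  simp [pvGoA_eq]
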